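-- pv_equiv track=rewrite | github.com/rdtharri/AdventOfCode2021 | 5/solution.py | iterate_diagonal
-- ===== SOURCE A (Python) =====
-- def iterate_diagonal(start, end):
--
--     current_x = start[0]
--     current_y = start[1]
--     if start[0] > end[0]:
--         while current_x >= end[0]:
--             if start[1] > end[1]:
--                 yield [current_x, current_y]
--                 current_x += -1
--                 current_y += -1
--             else:
--                 yield [current_x, current_y]
--                 current_x += -1
--                 current_y += 1
--     else:
--         while current_x <= end[0]:
--             if start[1] > end[1]:
--                 yield [current_x, current_y]
--                 current_x += 1
--                 current_y += -1
--             else: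
--                 yield [current_x, current_y]
--                 current_x += 1
--                 current_y += 1
--
--     pass
-- ===== SOURCE B (Python) =====
-- def iterate_diagonal(start, end):
--     # Divide and conquer: emit(x, y, k) yields the k diagonal points starting
--     # at (x, y) by splitting the segment in half (recursion depth O(log n)).
--     sx = -1 if start[0] > end[0] else 1
--     sy = -1 if start[1] > end[1] else 1
--     def emit(x, y, k):
--         if k == 1:
--             yield [x, y]
--         else:
--             h = k // 2
--             yield from emit(x, y, h)
--             yield from emit(x + h * sx, y + h * sy, k - h)
--     yield from emit(start[0], start[1], abs(end[0] - start[0]) + 1)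
-- ===== Notes on version B (the rewrite author's own statement) =====
-- stated objective: alternative
-- what changed: Replaced A's two sign-branching counter-mutating while-loops by a divide-and-conquer generator that computes the point count abs(end[0]-start[0])+1 and the two steps up front, then recursively splits the segment in half and emits each half.
import Mathlib
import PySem

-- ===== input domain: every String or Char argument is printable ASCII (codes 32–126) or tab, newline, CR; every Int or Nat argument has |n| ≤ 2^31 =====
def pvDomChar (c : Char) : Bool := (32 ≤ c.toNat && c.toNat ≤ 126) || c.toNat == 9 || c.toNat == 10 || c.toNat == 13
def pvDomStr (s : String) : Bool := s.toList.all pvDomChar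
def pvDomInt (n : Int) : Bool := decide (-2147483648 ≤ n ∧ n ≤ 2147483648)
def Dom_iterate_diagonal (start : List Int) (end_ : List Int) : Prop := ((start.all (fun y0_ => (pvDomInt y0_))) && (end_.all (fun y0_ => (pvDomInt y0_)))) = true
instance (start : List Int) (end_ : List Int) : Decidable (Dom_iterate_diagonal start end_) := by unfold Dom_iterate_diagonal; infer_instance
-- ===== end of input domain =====

-- B replaces A's two counter-mutating while-loops by a divide-and-conquer generator
-- with precomputed steps and point count (objective: alternative).

-- ===== PORT A =====
-- the 'if start[0] > end[0]' while-loop, descending in x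
def aLoopDown (e0 s1 e1 : Int) (cx cy : Int) : List (List Int) :=
  if cx ≥ e0 then
    if s1 > e1 then [cx, cy] :: aLoopDown e0 s1 e1 (cx - 1) (cy - 1)
    else [cx, cy] :: aLoopDown e0 s1 e1 (cx - 1) (cy + 1)
  else []
termination_by (cx + 1 - e0).toNat
decreasing_by all_goals omega

-- the else-branch while-loop, ascending in x
def aLoopUp (e0 s1 e1 : Int) (cx cy : Int) : List (List Int) :=
  if cx ≤ e0 then
    if s1 > e1 then [cx, cy] :: aLoopUp e0 s1 e1 (cx + 1) (cy - 1)
    else [cx, cy] :: aLoopUp e0 s1 e1 (cx + 1) (cy + 1)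
  else []
termination_by (e0 + 1 - cx).toNat
decreasing_by all_goals omega

def iterate_diagonal (start : List Int) (end_ : List Int) : List (List Int) :=
  let s0 := (PySem.List.pyGet? start 0).getD 0
  let s1 := (PySem.List.pyGet? start 1).getD 0
  let e0 := (PySem.List.pyGet? end_ 0).getD 0
  let e1 := (PySem.List.pyGet? end_ 1).getD 0
  if s0 > e0 then aLoopDown e0 s1 e1 s0 s1 else aLoopUp e0 s1 e1 s0 s1

-- ===== PORT B =====
-- Source B's inner divide-and-conquer generator 'emit'; k = 0 never occurs on B's
-- actual calls (k starts at natAbs+1 ≥ 1) — returning [] there only makes it total.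
def bEmit (sx sy : Int) (x y : Int) (k : Nat) : List (List Int) :=
  match k with
  | 0 => []
  | 1 => [[x, y]]
  | m + 2 =>
    let h : Nat := (m + 2) / 2
    bEmit sx sy x y h ++ bEmit sx sy (x + h * sx) (y + h * sy) (m + 2 - h)
termination_by k
decreasing_by all_goals omega

def iterate_diagonal_alt (start : List Int) (end_ : List Int) : List (List Int) :=
  let s0 := (PySem.List.pyGet? start 0).getD 0
  let s1 := (PySem.List.pyGet? start 1).getD 0
  let e0 := (PySem.List.pyGet? end_ 0).getD 0
  let e1 := (PySem.List.pyGet? end_ 1).getD 0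
  let sx : Int := if s0 > e0 then -1 else 1
  let sy : Int := if s1 > e1 then -1 else 1
  bEmit sx sy s0 s1 ((e0 - s0).natAbs + 1)

-- ===== PRECONDITION & SPEC =====
-- Pre_ excludes exactly the inputs on which Python A raises IndexError: a missing x or y coordinate.
def Pre_iterate_diagonal (start : List Int) (end_ : List Int) : Prop :=
  2 ≤ start.length ∧ 2 ≤ end_.length
instance (start : List Int) (end_ : List Int) : Decidable (Pre_iterate_diagonal start end_) := by unfold Pre_iterate_diagonal; infer_instance
def pvWitness_iterate_diagonal : List Int × List Int := ([1, 5], [4, 2])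

def Spec_iterate_diagonal (start : List Int) (end_ : List Int) (out : List (List Int)) : Prop := out = iterate_diagonal_alt start end_
instance (start : List Int) (end_ : List Int) (out : List (List Int)) : Decidable (Spec_iterate_diagonal start end_ out) := by unfold Spec_iterate_diagonal; infer_instance

-- ===== CLAIM (what is proved, stated in full; the proofs are below) =====
def Claim_equal_iterate_diagonal : Prop := ∀ (start : List Int) (end_ : List Int), Dom_iterate_diagonal start end_ → Pre_iterate_diagonal start end_ → Spec_iterate_diagonal start end_ (iterate_diagonal start end_)

-- ===== LEMMAS AND PROOFS =====

theorem aLoopDown_eq (e0 s1 e1 : Int) : ∀ (n : Nat) (cx cy : Int), cx + 1 - e0 = n →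
    aLoopDown e0 s1 e1 cx cy =
      (List.range n).map (fun (i : Nat) => [cx - (i : Int), cy + (i : Int) * (if s1 > e1 then -1 else 1)]) := by
  intro n
  induction n with
  | zero =>
    intro cx cy h
    rw [aLoopDown, if_neg (by omega)]
    simp
  | succ n ih =>
    intro cx cy h
    rw [aLoopDown, if_pos (by omega), List.range_succ_eq_map, List.map_cons, List.map_map]
    by_cases hy : s1 > e1
    · rw [if_pos hy, ih (cx - 1) (cy - 1) (by omega)]
      refine List.cons_eq_cons.mpr ⟨by simp [hy], ?_⟩
      refine List.map_congr_left (fun i _ => ?_)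
      simp only [Function.comp, hy, if_pos]
      simp only [List.cons.injEq, and_true]
      exact ⟨by push_cast; ring, by push_cast; ring⟩
    · rw [if_neg hy, ih (cx - 1) (cy + 1) (by omega)]
      refine List.cons_eq_cons.mpr ⟨by simp [hy], ?_⟩
      refine List.map_congr_left (fun i _ => ?_)
      simp only [Function.comp, hy, if_false]
      simp only [List.cons.injEq, and_true]
      exact ⟨by push_cast; ring, by push_cast; ring⟩

theorem aLoopUp_eq (e0 s1 e1 : Int) : ∀ (n : Nat) (cx cy : Int), e0 + 1 - cx = n →
    aLoopUp e0 s1 e1 cx cy =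
      (List.range n).map (fun (i : Nat) => [cx + (i : Int), cy + (i : Int) * (if s1 > e1 then -1 else 1)]) := by
  intro n
  induction n with
  | zero =>
    intro cx cy h
    rw [aLoopUp, if_neg (by omega)]
    simp
  | succ n ih =>
    intro cx cy h
    rw [aLoopUp, if_pos (by omega), List.range_succ_eq_map, List.map_cons, List.map_map]
    by_cases hy : s1 > e1
    · rw [if_pos hy, ih (cx + 1) (cy - 1) (by omega)]
      refine List.cons_eq_cons.mpr ⟨by simp [hy], ?_⟩
      refine List.map_congr_left (fun i _ => ?_)
      simp only [Function.comp, hy, if_pos]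
      simp only [List.cons.injEq, and_true]
      exact ⟨by push_cast; ring, by push_cast; ring⟩
    · rw [if_neg hy, ih (cx + 1) (cy + 1) (by omega)]
      refine List.cons_eq_cons.mpr ⟨by simp [hy], ?_⟩
      refine List.map_congr_left (fun i _ => ?_)
      simp only [Function.comp, hy, if_false]
      simp only [List.cons.injEq, and_true]
      exact ⟨by push_cast; ring, by push_cast; ring⟩

theorem bEmit_eq (sx sy : Int) : ∀ (k : Nat) (x y : Int),
    bEmit sx sy x y k = (List.range k).map (fun (i : Nat) => [x + (i : Int) * sx, y + (i : Int) * sy]) := by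
  intro k
  induction k using Nat.strong_induction_on with
  | _ k ih =>
    intro x y
    match k with
    | 0 => simp [bEmit]
    | 1 => simp [bEmit]
    | (m + 2) =>
      simp only [bEmit]
      have hk : m + 2 = (m + 2) / 2 + (m + 2 - (m + 2) / 2) := by omega
      rw [ih ((m + 2) / 2) (by omega), ih (m + 2 - (m + 2) / 2) (by omega)]
      conv_rhs => rw [hk]
      rw [List.range_add, List.map_append, List.map_map]
      refine congrArg₂ _ rfl (List.map_congr_left (fun i _ => ?_))
      simp only [Function.comp, List.cons.injEq, and_true]
      exact ⟨by push_cast; ring, by push_cast; ring⟩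

theorem core_eq (s0 s1 e0 e1 : Int) :
    (if s0 > e0 then aLoopDown e0 s1 e1 s0 s1 else aLoopUp e0 s1 e1 s0 s1) =
      bEmit (if s0 > e0 then -1 else 1) (if s1 > e1 then -1 else 1) s0 s1 ((e0 - s0).natAbs + 1) := by
  rw [bEmit_eq]
  by_cases h : s0 > e0
  · simp only [if_pos h]
    rw [aLoopDown_eq e0 s1 e1 ((e0 - s0).natAbs + 1) s0 s1 (by omega)]
    refine List.map_congr_left (fun i _ => ?_)
    have hx : s0 - (i : Int) = s0 + (i : Int) * -1 := by ring
    rw [hx]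
  · simp only [if_neg h]
    rw [aLoopUp_eq e0 s1 e1 ((e0 - s0).natAbs + 1) s0 s1 (by omega)]
    refine List.map_congr_left (fun i _ => ?_)
    have hx : s0 + (i : Int) = s0 + (i : Int) * 1 := by ring
    rw [hx]

-- ===== VERDICT (by name: the statement is the Claim_ definition above) =====
theorem iterate_diagonal_spec : Claim_equal_iterate_diagonal := by
  intro start end_ _ _
  show iterate_diagonal start end_ = iterate_diagonal_alt start end_
  unfold iterate_diagonal iterate_diagonal_alt
  exact core_eq _ _ _ _
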